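-- pv_equiv track=rewrite | github.com/trynmaps/metrics-mvp | backend/models/gtfs.py | contains_included_stops
-- ===== SOURCE A (Python) =====
-- def contains_included_stops(shape_stop_ids, included_stop_ids):
--     min_index = 0
--     for stop_id in included_stop_ids:
--         try:
--             index = shape_stop_ids.index(stop_id, min_index)
--         except ValueError:
--             return False
--         min_index = index + 1 # stops must appear in same order as in included_stop_ids
--     return True
-- ===== SOURCE B (Python) =====
-- def contains_included_stops(shape_stop_ids, included_stop_ids):
--     i = 0
--     n = len(included_stop_ids)
--     for stop_id in shape_stop_ids:
--         if i < n and included_stop_ids[i] == stop_id: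
--             i += 1
--     return i == n
-- ===== Notes on version B (the rewrite author's own statement) =====
-- stated objective: idiomatic
-- what changed: Replaced repeated list.index(stop, min_index) calls with a single two-pointer scan driven over shape_stop_ids that advances a cursor into included_stop_ids.
import Mathlib
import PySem

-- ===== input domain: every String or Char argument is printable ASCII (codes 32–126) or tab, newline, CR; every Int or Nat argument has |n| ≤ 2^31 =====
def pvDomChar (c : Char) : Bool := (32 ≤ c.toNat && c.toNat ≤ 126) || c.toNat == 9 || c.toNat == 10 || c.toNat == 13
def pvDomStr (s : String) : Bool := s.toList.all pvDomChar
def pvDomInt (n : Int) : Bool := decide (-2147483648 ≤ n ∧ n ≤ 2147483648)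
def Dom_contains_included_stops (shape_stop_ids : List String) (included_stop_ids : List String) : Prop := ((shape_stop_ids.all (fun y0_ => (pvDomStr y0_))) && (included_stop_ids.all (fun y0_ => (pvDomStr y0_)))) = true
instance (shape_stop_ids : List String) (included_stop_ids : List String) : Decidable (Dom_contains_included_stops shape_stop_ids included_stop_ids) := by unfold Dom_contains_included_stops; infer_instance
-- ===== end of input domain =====

-- B replaces A's repeated list.index(stop, min_index) search with a single two-pointer
-- scan over shape_stop_ids (idiomatic subsequence test); return values are identical.

-- ===== PORT A =====
-- A's loop over included_stop_ids, carrying min_index; shape_stop_ids.index(x, min_index)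
-- = min_index + first index of x in (shape.drop min_index), ValueError when absent.
def aLoop (shape_stop_ids : List String) (min_index : Nat) (included : List String) : Bool :=
  match included with
  | [] => true
  | stop_id :: rest =>
    match (shape_stop_ids.drop min_index).findIdx? (· == stop_id) with
    | none => false
    | some j => aLoop shape_stop_ids (min_index + j + 1) rest

def contains_included_stops (shape_stop_ids : List String) (included_stop_ids : List String) : Bool :=
  aLoop shape_stop_ids 0 included_stop_ids

-- ===== PORT B =====
-- B's for-loop over shape_stop_ids carrying the cursor i into included_stop_ids.
def bLoop (included : List String) (i : Nat) (shape : List String) : Nat :=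
  match shape with
  | [] => i
  | stop_id :: rest =>
    if i < included.length ∧ included[i]? = some stop_id then
      bLoop included (i + 1) rest
    else
      bLoop included i rest

def contains_included_stops_alt (shape_stop_ids : List String) (included_stop_ids : List String) : Bool :=
  bLoop included_stop_ids 0 shape_stop_ids == included_stop_ids.length

-- ===== PRECONDITION & SPEC =====
def Spec_contains_included_stops (shape_stop_ids : List String) (included_stop_ids : List String) (out : Bool) : Prop := out = contains_included_stops_alt shape_stop_ids included_stop_ids
instance (shape_stop_ids : List String) (included_stop_ids : List String) (out : Bool) : Decidable (Spec_contains_included_stops shape_stop_ids included_stop_ids out) := by unfold Spec_contains_included_stops; infer_instance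

-- ===== CLAIM (what is proved, stated in full; the proofs are below) =====
def Claim_equal_contains_included_stops : Prop := ∀ (shape_stop_ids : List String) (included_stop_ids : List String), Dom_contains_included_stops shape_stop_ids included_stop_ids → Spec_contains_included_stops shape_stop_ids included_stop_ids (contains_included_stops shape_stop_ids included_stop_ids)

-- ===== LEMMAS AND PROOFS =====

-- reference subsequence predicate both ports are reduced to
def sub (shape : List String) (inc : List String) : Bool :=
  match shape, inc with
  | _, [] => true
  | [], _ :: _ => false
  | s :: ss, x :: xs => if s = x then sub ss xs else sub ss (x :: xs)

theorem sub_not_mem (d : List String) (x : String) (xs : List String)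
    (h : ∀ y ∈ d, ¬ y = x) : sub d (x :: xs) = false := by
  induction d with
  | nil => simp [sub]
  | cons s ss ih =>
    have hx : ¬ s = x := h s (by simp)
    simp [sub, hx, ih (fun y hy => h y (by simp [hy]))]

theorem sub_findIdx_some (d : List String) (x : String) (xs : List String) (j : Nat)
    (h : d.findIdx? (· == x) = some j) : sub d (x :: xs) = sub (d.drop (j + 1)) xs := by
  induction d generalizing j with
  | nil => simp at h
  | cons s ss ih =>
    rw [List.findIdx?_cons] at h
    by_cases hx : s = x
    · simp [hx] at h
      subst h
      simp [sub, hx]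
    · simp [hx] at h
      obtain ⟨j', hj', rfl⟩ := h
      simp [sub, hx, ih j' hj']

theorem aLoop_eq_sub (shape : List String) (inc : List String) (m : Nat) :
    aLoop shape m inc = sub (shape.drop m) inc := by
  induction inc generalizing m with
  | nil => simp [aLoop, sub]
  | cons x xs ih =>
    cases h : (shape.drop m).findIdx? (· == x) with
    | none =>
      have h' : ∀ y ∈ shape.drop m, ¬ y = x := by
        have := List.findIdx?_eq_none_iff.mp h
        simpa using this
      simp only [aLoop, h]
      rw [sub_not_mem _ _ xs h']
    | some j =>
      simp only [aLoop, h]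
      rw [ih, sub_findIdx_some _ _ xs j h, List.drop_drop, Nat.add_assoc]

theorem bLoop_eq_sub (shape : List String) (inc : List String) (i : Nat) (hi : i ≤ inc.length) :
    (bLoop inc i shape == inc.length) = sub shape (inc.drop i) := by
  induction shape generalizing i with
  | nil =>
    simp only [bLoop]
    rcases Nat.lt_or_ge i inc.length with h | h
    · have hne : ¬ (i = inc.length) := by omega
      have : inc.drop i ≠ [] := by
        intro hd
        have := List.drop_eq_nil_iff.mp hd
        omega
      cases hd : inc.drop i with
      | nil => exact absurd hd this
      | cons y ys => simp [sub, hne]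
    · have : i = inc.length := by omega
      subst this
      simp [sub, List.drop_length]
  | cons s ss ih =>
    simp only [bLoop]
    by_cases hc : i < inc.length ∧ inc[i]? = some s
    · obtain ⟨hlt, hget⟩ := hc
      have hd : inc.drop i = s :: inc.drop (i + 1) := by
        have := List.getElem?_eq_some_iff.mp hget
        obtain ⟨h1, h2⟩ := this
        rw [List.drop_eq_getElem_cons hlt, h2]
      rw [if_pos ⟨hlt, hget⟩, ih (i + 1) hlt, hd]
      simp [sub]
    · rw [if_neg hc, ih i hi]
      cases hd : inc.drop i with
      | nil => simp [sub]
      | cons y ys =>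
        have hlt : i < inc.length := by
          by_contra h
          rw [List.drop_eq_nil_iff.mpr (by omega)] at hd
          exact absurd hd (by simp)
        have hy : inc[i]? = some y := by
          rw [List.drop_eq_getElem_cons hlt] at hd
          simp only [List.cons.injEq] at hd
          rw [List.getElem?_eq_getElem hlt, hd.1]
        have hne : ¬ s = y := by
          intro h
          exact hc ⟨hlt, by rw [hy, h]⟩
        simp [sub, hne]

-- ===== VERDICT (by name: the statement is the Claim_ definition above) =====
theorem contains_included_stops_spec : Claim_equal_contains_included_stops := by
  intro shape inc _
  unfold Spec_contains_included_stops contains_included_stops contains_included_stops_alt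
  rw [aLoop_eq_sub, bLoop_eq_sub shape inc 0 (Nat.zero_le _)]
  simp
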